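-- pv_equiv track=rewrite | github.com/MrBrantCode/unitest_baseline | mut_generate/mist_train_cf/cf_53136/solution.py | alternate_arrays
-- ===== SOURCE A (Python) =====
-- def alternate_arrays(arr1, arr2, arr3):
--     output = []
--     for i in range(max(len(arr1), len(arr2), len(arr3))):
--         if i < len(arr1):
--             output.append(arr1[i])
--         if i < len(arr2):
--             output.append(arr2[i])
--         if i < len(arr3):
--             output.append(arr3[i])
--     return output
-- ===== SOURCE B (Python) =====
-- def alternate_arrays(arr1, arr2, arr3):
--     # Tag every element with a globally unique rank 3*i + j (i = position in its
--     # array, j = which array), then a single sort by rank yields the interleaved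
--     # order directly; finally project the values out.
--     tagged = [(3 * i + j, x)
--               for j, arr in enumerate((arr1, arr2, arr3))
--               for i, x in enumerate(arr)]
--     tagged.sort(key=lambda p: p[0])
--     return [x for _, x in tagged]
-- ===== Notes on version B (the rewrite author's own statement) =====
-- stated objective: alternative
-- what changed: Replaces the max-length index loop with three per-index bounds checks by a decorate-sort-undecorate scheme: each element gets a unique rank 3*i+j, the tagged elements are concatenated and sorted by rank, and the values are projected out.
import Mathlib
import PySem

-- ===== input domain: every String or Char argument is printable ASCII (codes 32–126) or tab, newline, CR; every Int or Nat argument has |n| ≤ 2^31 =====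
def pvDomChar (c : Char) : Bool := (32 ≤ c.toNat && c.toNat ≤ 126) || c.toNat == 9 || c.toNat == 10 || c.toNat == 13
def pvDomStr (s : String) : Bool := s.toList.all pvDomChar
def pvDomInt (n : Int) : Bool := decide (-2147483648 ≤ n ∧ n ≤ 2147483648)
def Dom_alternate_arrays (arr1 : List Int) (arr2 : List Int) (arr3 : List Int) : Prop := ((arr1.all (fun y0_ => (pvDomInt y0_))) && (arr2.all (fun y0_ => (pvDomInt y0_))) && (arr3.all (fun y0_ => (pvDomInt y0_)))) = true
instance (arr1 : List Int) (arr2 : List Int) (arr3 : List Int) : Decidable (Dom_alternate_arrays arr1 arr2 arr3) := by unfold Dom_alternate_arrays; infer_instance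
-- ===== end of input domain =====

-- B (alternative): replaces A's max-length index loop with three bounds checks by a
-- decorate-sort-undecorate scheme: tag each element with a unique rank 3*i+j, sort by rank, project.


-- ===== PORT A =====
def alternate_arrays (arr1 : List Int) (arr2 : List Int) (arr3 : List Int) : List Int :=
  (PySem.List.pyRange 0 (max (arr1.length : Int) (max (arr2.length : Int) (arr3.length : Int))) 1).foldl
    (fun output i =>
      let output := if i < (arr1.length : Int) then output ++ [PySem.List.pyGetD arr1 i 0] else output
      let output := if i < (arr2.length : Int) then output ++ [PySem.List.pyGetD arr2 i 0] else output
      if i < (arr3.length : Int) then output ++ [PySem.List.pyGetD arr3 i 0] else output)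
    []

-- ===== PORT B =====
-- the inner comprehension pass for one array: tag the element at position i with rank 3*i + j
def pvTag (j : Int) (arr : List Int) : List (Int × Int) :=
  (PySem.List.enumerate arr 0).map (fun p => (3 * p.1 + j, p.2))

def alternate_arrays_alt (arr1 : List Int) (arr2 : List Int) (arr3 : List Int) : List Int :=
  let tagged := pvTag 0 arr1 ++ pvTag 1 arr2 ++ pvTag 2 arr3
  (PySem.List.sorted tagged (fun p => p.1) false).map (fun p => p.2)

-- ===== PRECONDITION & SPEC =====
def Spec_alternate_arrays (arr1 : List Int) (arr2 : List Int) (arr3 : List Int) (out : List Int) : Prop := out = alternate_arrays_alt arr1 arr2 arr3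
instance (arr1 : List Int) (arr2 : List Int) (arr3 : List Int) (out : List Int) : Decidable (Spec_alternate_arrays arr1 arr2 arr3 out) := by unfold Spec_alternate_arrays; infer_instance

-- ===== CLAIM (what is proved, stated in full; the proofs are below) =====
def Claim_equal_alternate_arrays : Prop := ∀ (arr1 : List Int) (arr2 : List Int) (arr3 : List Int), Dom_alternate_arrays arr1 arr2 arr3 → Spec_alternate_arrays arr1 arr2 arr3 (alternate_arrays arr1 arr2 arr3)

-- ===== LEMMAS AND PROOFS =====

-- the tagged contribution of column k (the element of each array at position k, if present)
def tcol (arr1 arr2 arr3 : List Int) (k : Nat) : List (Int × Int) :=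
  (if k < arr1.length then [(3 * (k : Int) + 0, PySem.List.pyGetD arr1 (k : Int) 0)] else []) ++
  ((if k < arr2.length then [(3 * (k : Int) + 1, PySem.List.pyGetD arr2 (k : Int) 0)] else []) ++
   (if k < arr3.length then [(3 * (k : Int) + 2, PySem.List.pyGetD arr3 (k : Int) 0)] else []))

-- the per-column contribution of index i in A's loop
def gcol (arr1 arr2 arr3 : List Int) (i : Int) : List Int :=
  (if i < (arr1.length : Int) then [PySem.List.pyGetD arr1 i 0] else []) ++
  ((if i < (arr2.length : Int) then [PySem.List.pyGetD arr2 i 0] else []) ++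
   (if i < (arr3.length : Int) then [PySem.List.pyGetD arr3 i 0] else []))

theorem foldl_to_flatMap (arr1 arr2 arr3 : List Int) (l : List Int) (acc : List Int) :
    l.foldl
      (fun output i =>
        let output := if i < (arr1.length : Int) then output ++ [PySem.List.pyGetD arr1 i 0] else output
        let output := if i < (arr2.length : Int) then output ++ [PySem.List.pyGetD arr2 i 0] else output
        if i < (arr3.length : Int) then output ++ [PySem.List.pyGetD arr3 i 0] else output)
      acc = acc ++ l.flatMap (gcol arr1 arr2 arr3) := by
  induction l generalizing acc with
  | nil => simp
  | cons i l ih =>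
      simp only [List.foldl_cons, List.flatMap_cons, ih]
      have : (let output := if i < (arr1.length : Int) then acc ++ [PySem.List.pyGetD arr1 i 0] else acc
              let output := if i < (arr2.length : Int) then output ++ [PySem.List.pyGetD arr2 i 0] else output
              if i < (arr3.length : Int) then output ++ [PySem.List.pyGetD arr3 i 0] else output)
             = acc ++ gcol arr1 arr2 arr3 i := by
        simp only [gcol]
        split_ifs <;> simp
      rw [this, List.append_assoc]

-- A's output is the column-wise flatMap
theorem a_eq_flatMap (arr1 arr2 arr3 : List Int) :
    alternate_arrays arr1 arr2 arr3
      = (List.range (max arr1.length (max arr2.length arr3.length))).flatMap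
          (fun k : Nat => gcol arr1 arr2 arr3 (k : Int)) := by
  unfold alternate_arrays
  rw [foldl_to_flatMap, List.nil_append, PySem.List.pyRange_one]
  have hN : (max (arr1.length : Int) (max (arr2.length : Int) (arr3.length : Int)) - 0).toNat
      = max arr1.length (max arr2.length arr3.length) := by omega
  rw [hN, List.flatMap_map]
  congr 1
  funext k
  rw [Int.zero_add]

-- projecting the values out of a tagged column gives A's column
theorem map_snd_tcol (arr1 arr2 arr3 : List Int) (k : Nat) :
    (tcol arr1 arr2 arr3 k).map (fun p => p.2) = gcol arr1 arr2 arr3 (k : Int) := by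
  simp only [tcol, gcol, List.map_append, Nat.cast_lt]
  split_ifs <;> simp

-- flatMap distributes over pointwise append, up to permutation
theorem flatMap_append_perm {α β : Type} (l : List α) (f g : α → List β) :
    (l.flatMap (fun x => f x ++ g x)).Perm (l.flatMap f ++ l.flatMap g) := by
  induction l with
  | nil => simp
  | cons x l ih =>
      simp only [List.flatMap_cons]
      refine (ih.append_left (f x ++ g x)).trans ?_
      simp only [List.append_assoc]
      refine List.Perm.append_left (f x) ?_
      have h := (List.perm_append_comm (l₁ := g x) (l₂ := l.flatMap f)).append_right (l.flatMap g)
      simpa [List.append_assoc] using h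

-- flatMap of one array's optional column over a long enough range is its tag list
theorem flatMap_opt_eq_tag (xs : List Int) (j : Int) (N : Nat) (hN : xs.length ≤ N) :
    (List.range N).flatMap
        (fun k : Nat => if k < xs.length then [(3 * (k : Int) + j, PySem.List.pyGetD xs (k : Int) 0)] else [])
      = pvTag j xs := by
  obtain ⟨m, rfl⟩ : ∃ m, N = xs.length + m := ⟨N - xs.length, by omega⟩
  rw [List.range_add, List.flatMap_append, List.flatMap_map]
  have h2 : (List.range m).flatMap
      (fun t : Nat => if xs.length + t < xs.length then
          [(3 * ((xs.length + t : Nat) : Int) + j, PySem.List.pyGetD xs ((xs.length + t : Nat) : Int) 0)]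
        else []) = [] := by
    apply List.flatMap_eq_nil_iff.mpr
    intro t _
    rw [if_neg (by omega)]
  rw [h2, List.append_nil]
  have hL : (List.range xs.length).flatMap
      (fun k : Nat => if k < xs.length then [(3 * (k : Int) + j, PySem.List.pyGetD xs (k : Int) 0)] else [])
      = (List.range xs.length).map (fun k : Nat => (3 * (k : Int) + j, PySem.List.pyGetD xs (k : Int) 0)) := by
    rw [List.map_eq_flatMap]
    apply List.flatMap_congr
    intro k hk
    rw [if_pos (List.mem_range.mp hk)]
  rw [hL, pvTag, PySem.List.enumerate_eq_map_pyRange (d := 0), List.map_map,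
    PySem.List.pyRange_one]
  simp only [Int.sub_zero, List.map_map]
  congr 1
  funext k
  simp

-- every key in column k lies in [3k, 3k+3)
theorem key_mem_tcol (arr1 arr2 arr3 : List Int) (k : Nat) (p : Int × Int)
    (hp : p ∈ tcol arr1 arr2 arr3 k) : 3 * (k : Int) ≤ p.1 ∧ p.1 < 3 * (k : Int) + 3 := by
  simp only [tcol, List.mem_append] at hp
  rcases hp with h | h | h <;> split_ifs at h <;> simp_all

-- the interleaved tagged list has strictly increasing keys
theorem pairwise_T (arr1 arr2 arr3 : List Int) (N : Nat) :
    ((List.range N).flatMap (tcol arr1 arr2 arr3)).Pairwise (fun p q => p.1 < q.1) := by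
  rw [List.pairwise_flatMap]
  refine ⟨?_, ?_⟩
  · intro k _
    simp only [tcol]
    split_ifs <;> simp
  · refine List.Pairwise.imp_of_mem ?_ (List.pairwise_lt_range (n := N))
    intro a b _ _ hab p hp q hq
    have h1 := key_mem_tcol arr1 arr2 arr3 a p hp
    have h2 := key_mem_tcol arr1 arr2 arr3 b q hq
    omega

-- the interleaved tagged list is a permutation of B's tagged concatenation
theorem perm_T (arr1 arr2 arr3 : List Int) :
    ((List.range (max arr1.length (max arr2.length arr3.length))).flatMap (tcol arr1 arr2 arr3)).Perm
      (pvTag 0 arr1 ++ pvTag 1 arr2 ++ pvTag 2 arr3) := by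
  set N := max arr1.length (max arr2.length arr3.length) with hN
  have p1 := flatMap_append_perm (List.range N)
    (fun k : Nat => if k < arr1.length then [(3 * (k : Int) + 0, PySem.List.pyGetD arr1 (k : Int) 0)] else [])
    (fun k : Nat =>
      (if k < arr2.length then [(3 * (k : Int) + 1, PySem.List.pyGetD arr2 (k : Int) 0)] else []) ++
      (if k < arr3.length then [(3 * (k : Int) + 2, PySem.List.pyGetD arr3 (k : Int) 0)] else []))
  have p2 := flatMap_append_perm (List.range N)
    (fun k : Nat => if k < arr2.length then [(3 * (k : Int) + 1, PySem.List.pyGetD arr2 (k : Int) 0)] else [])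
    (fun k : Nat => if k < arr3.length then [(3 * (k : Int) + 2, PySem.List.pyGetD arr3 (k : Int) 0)] else [])
  have e1 := flatMap_opt_eq_tag arr1 0 N (by omega)
  have e2 := flatMap_opt_eq_tag arr2 1 N (by omega)
  have e3 := flatMap_opt_eq_tag arr3 2 N (by omega)
  have ht : tcol arr1 arr2 arr3 = fun k : Nat =>
      (if k < arr1.length then [(3 * (k : Int) + 0, PySem.List.pyGetD arr1 (k : Int) 0)] else []) ++
      ((if k < arr2.length then [(3 * (k : Int) + 1, PySem.List.pyGetD arr2 (k : Int) 0)] else []) ++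
       (if k < arr3.length then [(3 * (k : Int) + 2, PySem.List.pyGetD arr3 (k : Int) 0)] else [])) := by
    funext k; rfl
  rw [ht, List.append_assoc]
  refine p1.trans ?_
  rw [e1]
  exact List.Perm.append_left _ (p2.trans (by rw [e2, e3]))

-- ===== VERDICT (by name: the statement is the Claim_ definition above) =====
theorem alternate_arrays_spec : Claim_equal_alternate_arrays := by
  intro arr1 arr2 arr3 _
  unfold Spec_alternate_arrays alternate_arrays_alt
  show alternate_arrays arr1 arr2 arr3
      = (PySem.List.sorted (pvTag 0 arr1 ++ pvTag 1 arr2 ++ pvTag 2 arr3) (fun p => p.1) false).map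
          (fun p => p.2)
  set N := max arr1.length (max arr2.length arr3.length) with hN
  have hs : PySem.List.sorted (pvTag 0 arr1 ++ pvTag 1 arr2 ++ pvTag 2 arr3) (fun p => p.1) false
      = (List.range N).flatMap (tcol arr1 arr2 arr3) :=
    PySem.List.sorted_eq_of_perm_of_pairwise_lt _ _ _ (perm_T arr1 arr2 arr3)
      (pairwise_T arr1 arr2 arr3 N)
  rw [hs, a_eq_flatMap, List.map_flatMap]
  apply List.flatMap_congr
  intro k _
  exact (map_snd_tcol arr1 arr2 arr3 k).symm
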